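-- pv_equiv track=rewrite | github.com/theredbluepill/arc-interactive | scripts/registry_gif_lib.py | _ice_slide_end_torus
-- ===== SOURCE A (Python) =====
-- def _ice_slide_end_torus(
--     gw: int,
--     gh: int,
--     blocked: set[tuple[int, int]],
--     px: int,
--     py: int,
--     dx: int,
--     dy: int,
-- ) -> tuple[int, int]:
--     """Stop cell after one slide; matches ic02.step (wrap at edges, cap gw*gh steps)."""
--     for _ in range(gw * gh):
--         nx = px + dx
--         ny = py + dy
--         if nx < 0:
--             nx = gw - 1
--         elif nx >= gw:
--             nx = 0
--         if ny < 0: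
--             ny = gh - 1
--         elif ny >= gh:
--             ny = 0
--         if (nx, ny) in blocked:
--             break
--         px, py = nx, ny
--     return (px, py)
-- ===== SOURCE B (Python) =====
-- def _ice_slide_end_torus(
--     gw: int,
--     gh: int,
--     blocked: set[tuple[int, int]],
--     px: int,
--     py: int,
--     dx: int,
--     dy: int,
-- ) -> tuple[int, int]:
--     """Brent-style cycle detection: same result as the step-by-step cap loop, but
--     once the trajectory revisits the anchor state the remaining step budget is
--     reduced modulo the cycle length instead of being walked one by one."""
--     cap = gw * gh
--
--     def step(p):
--         nx = p[0] + dx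
--         ny = p[1] + dy
--         if nx < 0:
--             nx = gw - 1
--         elif nx >= gw:
--             nx = 0
--         if ny < 0:
--             ny = gh - 1
--         elif ny >= gh:
--             ny = 0
--         return (nx, ny)
--
--     p = (px, py)
--     anchor = p
--     ta = 0
--     power = 1
--     t = 0
--     while t < cap:
--         q = step(p)
--         if q in blocked:
--             return p
--         if q == anchor:
--             L = t + 1 - ta
--             rem = (cap - (t + 1)) % L
--             for _ in range(rem):
--                 q = step(q)
--             return q
--         if t + 1 - ta == power:
--             anchor = q
--             ta = t + 1
--             power *= 2
--         p = q
--         t += 1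
--     return p
-- ===== Notes on version B (the rewrite author's own statement) =====
-- stated objective: faster
-- what changed: B replaces A's fixed gw*gh-iteration slide loop with Brent-style cycle detection: it keeps a single anchor state at power-of-two step indices and, when the trajectory returns to the anchor, reduces the remaining step budget modulo the cycle length, so it stops after O(preperiod + cycle length) steps instead of always gw*gh.
import Mathlib
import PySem

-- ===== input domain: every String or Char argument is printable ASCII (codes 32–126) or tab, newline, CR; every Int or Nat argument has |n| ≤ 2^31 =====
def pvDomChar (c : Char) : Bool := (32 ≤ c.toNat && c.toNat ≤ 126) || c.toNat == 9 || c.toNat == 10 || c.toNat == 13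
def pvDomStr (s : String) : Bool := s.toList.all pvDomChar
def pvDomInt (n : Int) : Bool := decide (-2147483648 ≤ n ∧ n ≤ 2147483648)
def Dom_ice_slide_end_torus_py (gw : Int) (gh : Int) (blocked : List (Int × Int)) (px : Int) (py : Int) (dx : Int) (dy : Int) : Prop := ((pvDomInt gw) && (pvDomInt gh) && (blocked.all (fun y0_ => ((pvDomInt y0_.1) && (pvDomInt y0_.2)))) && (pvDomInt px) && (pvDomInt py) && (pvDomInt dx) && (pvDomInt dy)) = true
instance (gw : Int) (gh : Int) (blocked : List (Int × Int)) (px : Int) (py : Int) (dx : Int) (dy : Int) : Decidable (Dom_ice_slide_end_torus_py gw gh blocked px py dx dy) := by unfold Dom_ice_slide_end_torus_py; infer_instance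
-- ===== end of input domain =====

-- ===== PORT A =====
-- B replaces A's step-by-step cap loop with Brent-style cycle detection (remaining step budget reduced mod the detected cycle length); equivalence of the return value is proved on all inputs.
def iceGoA (gw gh dx dy : Int) (blocked : List (Int × Int)) : Nat → Int × Int → Int × Int
  | 0, p => p
  | n+1, p =>
    let nx := p.1 + dx
    let nx2 := if nx < 0 then gw - 1 else if nx ≥ gw then 0 else nx
    let ny := p.2 + dy
    let ny2 := if ny < 0 then gh - 1 else if ny ≥ gh then 0 else ny
    if (nx2, ny2) ∈ blocked then p else iceGoA gw gh dx dy blocked n (nx2, ny2)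

def ice_slide_end_torus_py (gw : Int) (gh : Int) (blocked : List (Int × Int)) (px : Int) (py : Int) (dx : Int) (dy : Int) : Int × Int :=
  iceGoA gw gh dx dy blocked (gw * gh).toNat (px, py)

-- ===== PORT B =====
def pvStep (gw gh dx dy : Int) (p : Int × Int) : Int × Int :=
  let nx := p.1 + dx
  let ny := p.2 + dy
  (if nx < 0 then gw - 1 else if nx ≥ gw then 0 else nx,
   if ny < 0 then gh - 1 else if ny ≥ gh then 0 else ny)

-- the `for _ in range(rem): q = step(q)` loop of Source B
def pvIterN (f : Int × Int → Int × Int) : Nat → Int × Int → Int × Int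
  | 0, q => q
  | n+1, q => pvIterN f n (f q)

-- the `while t < cap` loop of Source B; fuel = (cap - t).toNat
def iceGoB (gw gh dx dy : Int) (blocked : List (Int × Int)) (cap : Int) : Nat → Int × Int → Int → Int → Int → Int × Int → Int × Int
  | 0, _, _, _, _, p => p
  | n+1, anchor, ta, power, t, p =>
    let q := pvStep gw gh dx dy p
    if q ∈ blocked then p
    else if q = anchor then
      let L := t + 1 - ta
      let rem := PySem.Int.mod (cap - (t + 1)) L
      pvIterN (pvStep gw gh dx dy) rem.toNat q
    else if t + 1 - ta = power then
      iceGoB gw gh dx dy blocked cap n q (t + 1) (power * 2) (t + 1) q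
    else
      iceGoB gw gh dx dy blocked cap n anchor ta power (t + 1) q

def ice_slide_end_torus_py_alt (gw : Int) (gh : Int) (blocked : List (Int × Int)) (px : Int) (py : Int) (dx : Int) (dy : Int) : Int × Int :=
  iceGoB gw gh dx dy blocked (gw * gh) (gw * gh).toNat (px, py) 0 1 0 (px, py)

-- ===== PRECONDITION & SPEC =====
def Spec_ice_slide_end_torus_py (gw : Int) (gh : Int) (blocked : List (Int × Int)) (px : Int) (py : Int) (dx : Int) (dy : Int) (out : Int × Int) : Prop := out = ice_slide_end_torus_py_alt gw gh blocked px py dx dy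
instance (gw : Int) (gh : Int) (blocked : List (Int × Int)) (px : Int) (py : Int) (dx : Int) (dy : Int) (out : Int × Int) : Decidable (Spec_ice_slide_end_torus_py gw gh blocked px py dx dy out) := by unfold Spec_ice_slide_end_torus_py; infer_instance

-- ===== CLAIM (what is proved, stated in full; the proofs are below) =====
def Claim_equal_ice_slide_end_torus_py : Prop := ∀ (gw : Int) (gh : Int) (blocked : List (Int × Int)) (px : Int) (py : Int) (dx : Int) (dy : Int), Dom_ice_slide_end_torus_py gw gh blocked px py dx dy → Spec_ice_slide_end_torus_py gw gh blocked px py dx dy (ice_slide_end_torus_py gw gh blocked px py dx dy)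

-- ===== LEMMAS AND PROOFS =====

theorem iceGoA_succ (gw gh dx dy : Int) (blocked : List (Int × Int)) (n : Nat) (p : Int × Int) :
    iceGoA gw gh dx dy blocked (n+1) p =
      if pvStep gw gh dx dy p ∈ blocked then p else iceGoA gw gh dx dy blocked n (pvStep gw gh dx dy p) := by
  rfl

theorem pvIterN_eq (f : Int × Int → Int × Int) (n : Nat) (q : Int × Int) :
    pvIterN f n q = f^[n] q := by
  induction n generalizing q with
  | zero => rfl
  | succ m ih => simpa [pvIterN, Function.iterate_succ_apply] using ih (f q)

theorem iceGoA_noblock (gw gh dx dy : Int) (blocked : List (Int × Int)) (n : Nat) (p : Int × Int)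
    (h : ∀ k : Nat, k < n → (pvStep gw gh dx dy)^[k+1] p ∉ blocked) :
    iceGoA gw gh dx dy blocked n p = (pvStep gw gh dx dy)^[n] p := by
  induction n generalizing p with
  | zero => rfl
  | succ m ih =>
    have h0 : pvStep gw gh dx dy p ∉ blocked := by
      simpa using h 0 (Nat.succ_pos m)
    rw [iceGoA_succ, if_neg h0, ih (pvStep gw gh dx dy p) (fun k hk => by
      simpa [Function.iterate_succ_apply] using h (k+1) (by omega))]
    simp [Function.iterate_succ_apply]

theorem iter_mod (f : Int × Int → Int × Int) (q : Int × Int) (L : Nat)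
    (hfix : f^[L] q = q) (m : Nat) : f^[m] q = f^[m % L] q := by
  conv_lhs => rw [← Nat.mod_add_div m L]
  rw [Function.iterate_add_apply, Function.iterate_mul, Function.iterate_fixed hfix]

theorem iceGoB_eq (gw gh dx dy : Int) (blocked : List (Int × Int)) (cap : Int) (p0 : Int × Int) :
    ∀ (n : Nat) (anchor : Int × Int) (ta : Int) (power : Int) (t : Nat) (p : Int × Int),
    p = (pvStep gw gh dx dy)^[t] p0 →
    (∃ ia : Nat, ta = (ia : Int) ∧ ia ≤ t ∧ anchor = (pvStep gw gh dx dy)^[ia] p0) →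
    (∀ i : Nat, 1 ≤ i → i ≤ t → (pvStep gw gh dx dy)^[i] p0 ∉ blocked) →
    cap = (t : Int) + n →
    iceGoB gw gh dx dy blocked cap n anchor ta power (t : Int) p = iceGoA gw gh dx dy blocked n p := by
  intro n
  induction n with
  | zero => intro anchor ta power t p _ _ _ _; rfl
  | succ m ih =>
    intro anchor ta power t p hp hanch hblk hcap
    obtain ⟨ia, hta, hle, hia⟩ := hanch
    have hq : pvStep gw gh dx dy p = (pvStep gw gh dx dy)^[t + 1] p0 := by
      rw [hp, ← Function.iterate_succ_apply' (pvStep gw gh dx dy)]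
    rw [iceGoA_succ, iceGoB]
    by_cases hb : pvStep gw gh dx dy p ∈ blocked
    · simp only [if_pos hb]
    · rw [if_neg hb, if_neg hb]
      by_cases hcyc : pvStep gw gh dx dy p = anchor
      · rw [if_pos hcyc]
        have hqi : pvStep gw gh dx dy p = (pvStep gw gh dx dy)^[ia] p0 := by rw [hcyc, hia]
        have hLpos : 0 < t + 1 - ia := by omega
        have hfix : (pvStep gw gh dx dy)^[t + 1 - ia] (pvStep gw gh dx dy p) = pvStep gw gh dx dy p := by
          rw [hqi, ← Function.iterate_add_apply, show t + 1 - ia + ia = t + 1 from by omega, ← hq, hqi]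
        have hnb : ∀ k : Nat, (pvStep gw gh dx dy)^[k] (pvStep gw gh dx dy p) ∉ blocked := by
          intro k
          rw [iter_mod _ _ _ hfix k]
          have hrlt : k % (t + 1 - ia) < t + 1 - ia := Nat.mod_lt _ hLpos
          rcases Nat.eq_zero_or_pos (k % (t + 1 - ia) + ia) with h0 | hpos
          · have hz : k % (t + 1 - ia) = 0 := by omega
            rw [hz]; exact hb
          · have he : (pvStep gw gh dx dy)^[k % (t + 1 - ia)] (pvStep gw gh dx dy p)
                = (pvStep gw gh dx dy)^[k % (t + 1 - ia) + ia] p0 := by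
              rw [hqi, ← Function.iterate_add_apply]
            rw [he]
            exact hblk _ hpos (by omega)
        have hAside : iceGoA gw gh dx dy blocked m (pvStep gw gh dx dy p)
            = (pvStep gw gh dx dy)^[m] (pvStep gw gh dx dy p) :=
          iceGoA_noblock gw gh dx dy blocked m (pvStep gw gh dx dy p) (fun k _ => hnb (k+1))
        have hrem : PySem.Int.mod (cap - ((t:Int) + 1)) ((t:Int) + 1 - ta)
            = ((m % (t + 1 - ia) : Nat) : Int) := by
          have h1 : cap - ((t:Int) + 1) = ((m : Nat) : Int) := by push_cast at hcap; omega
          have h2 : (t:Int) + 1 - ta = ((t + 1 - ia : Nat) : Int) := by rw [hta]; omega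
          rw [h1, h2, PySem.Int.mod_natCast]
        have htn : ((m % (t + 1 - ia) : Nat) : Int).toNat = m % (t + 1 - ia) := by omega
        have hgoal : pvIterN (pvStep gw gh dx dy) (PySem.Int.mod (cap - ((t:Int) + 1)) ((t:Int) + 1 - ta)).toNat (pvStep gw gh dx dy p)
            = (pvStep gw gh dx dy)^[m] (pvStep gw gh dx dy p) := by
          rw [hrem, htn, pvIterN_eq, ← iter_mod _ _ _ hfix m]
        exact hgoal.trans hAside.symm
      · rw [if_neg hcyc]
        have hblk' : ∀ i : Nat, 1 ≤ i → i ≤ t + 1 → (pvStep gw gh dx dy)^[i] p0 ∉ blocked := by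
          intro i h1 h2
          rcases Nat.lt_or_ge i (t+1) with h | h
          · exact hblk i h1 (by omega)
          · have : i = t + 1 := by omega
            subst this; rw [← hq]; exact hb
        have hcap' : cap = ((t + 1 : Nat) : Int) + (m : Int) := by push_cast at hcap ⊢; omega
        have hcast : (((t:Nat) + 1 : Nat) : Int) = (t : Int) + 1 := by push_cast; ring
        by_cases hpow : (t:Int) + 1 - ta = power
        · rw [if_pos hpow]
          have := ih (pvStep gw gh dx dy p) ((t:Int) + 1) (power * 2) (t+1) (pvStep gw gh dx dy p)
            hq ⟨t+1, by omega, le_refl _, hq⟩ hblk' hcap'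
          rw [hcast] at this
          exact this
        · rw [if_neg hpow]
          have := ih anchor ta power (t+1) (pvStep gw gh dx dy p)
            hq ⟨ia, hta, by omega, hia⟩ hblk' hcap'
          rw [hcast] at this
          exact this

-- ===== VERDICT (by name: the statement is the Claim_ definition above) =====
theorem ice_slide_end_torus_py_spec : Claim_equal_ice_slide_end_torus_py := by
  intro gw gh blocked px py dx dy _
  unfold Spec_ice_slide_end_torus_py ice_slide_end_torus_py ice_slide_end_torus_py_alt
  by_cases hle : gw * gh ≤ 0
  · rw [Int.toNat_of_nonpos hle]; rfl
  · have hpos : 0 < gw * gh := by omega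
    have h0 : iceGoB gw gh dx dy blocked (gw*gh) (gw*gh).toNat (px, py) 0 1 (((0:Nat) : Int)) (px, py) = iceGoA gw gh dx dy blocked (gw*gh).toNat (px, py) := by
      apply iceGoB_eq gw gh dx dy blocked (gw*gh) (px, py) (gw*gh).toNat _ 0 1 0 (px, py) rfl
      · exact ⟨0, rfl, le_refl _, rfl⟩
      · intro i h1 h2; omega
      · simp [Int.toNat_of_nonneg hpos.le]
    simpa using h0.symm
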